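-- pv_equiv track=rewrite | github.com/nikkhilaaryan/morse-transcriber | src/mappings/morse_map.py | _build_inverse_map
-- ===== SOURCE A (Python) =====
-- def _build_inverse_map(forward_map):
--     """Builds a reverse mapping from Morse code to characters."""
--     inverse_map = {}
--     for char, morse in forward_map.items():
--         if morse not in inverse_map:
--             inverse_map[morse] = char
--         else:
--             # Handle cases where multiple characters map to the same Morse code
--             inverse_map[morse] += f'/{char}'
--     return inverse_map
-- ===== SOURCE B (Python) =====
-- def _build_inverse_map(forward_map):
--     """Builds a reverse mapping from Morse code to characters (group then join)."""
--     groups = {}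
--     for char, morse in forward_map.items():
--         groups.setdefault(morse, []).append(char)
--     return {morse: '/'.join(chars) for morse, chars in groups.items()}
-- ===== Notes on version B (the rewrite author's own statement) =====
-- stated objective: simpler
-- what changed: Replaces A's single loop with an if/else membership branch and incremental string concatenation by a two-phase group-then-join: first collect the characters per morse key into lists (setdefault/append), then build the result with a '/'.join dict comprehension.
import Mathlib
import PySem

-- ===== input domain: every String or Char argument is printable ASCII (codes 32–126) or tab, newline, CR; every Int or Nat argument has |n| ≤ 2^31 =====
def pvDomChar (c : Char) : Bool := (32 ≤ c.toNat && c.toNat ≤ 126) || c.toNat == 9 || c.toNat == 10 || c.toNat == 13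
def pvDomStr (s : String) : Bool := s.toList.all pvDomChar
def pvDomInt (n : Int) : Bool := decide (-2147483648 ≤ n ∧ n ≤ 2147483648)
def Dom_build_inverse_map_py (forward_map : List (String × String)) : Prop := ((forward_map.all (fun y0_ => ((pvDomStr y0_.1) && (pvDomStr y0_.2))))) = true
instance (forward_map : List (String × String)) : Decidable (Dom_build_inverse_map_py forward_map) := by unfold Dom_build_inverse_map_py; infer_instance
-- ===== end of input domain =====

-- B builds a morse→[chars] grouping first and then '/'-joins each group in a second pass,
-- replacing A's incremental string concatenation with an if/else branch; objective: simpler.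

-- ===== PORT A =====
-- A: one loop; first occurrence stores the char, later occurrences append '/char' to the stored string.
def build_inverse_map_py (forward_map : List (String × String)) : List (String × String) :=
  (forward_map.foldl
    (fun inverse_map p =>
      match inverse_map.get? p.2 with
      | none => inverse_map.insert p.2 p.1
      | some s => inverse_map.insert p.2 (s ++ "/" ++ p.1))
    PySem.Dict.empty).items

-- ===== PORT B =====
-- B: group chars per morse key (setdefault/append = modify with default []), then join each group with '/'.
def build_inverse_map_py_alt (forward_map : List (String × String)) : List (String × String) :=
  (forward_map.foldl
    (fun groups p => groups.modify p.2 [] (fun cs => cs ++ [p.1]))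
    (PySem.Dict.empty : PySem.Dict String (List String))).items.map
    (fun q => (q.1, PySem.Str.join "/" q.2))

-- ===== PRECONDITION & SPEC =====
def Spec_build_inverse_map_py (forward_map : List (String × String)) (out : List (String × String)) : Prop := out = build_inverse_map_py_alt forward_map
instance (forward_map : List (String × String)) (out : List (String × String)) : Decidable (Spec_build_inverse_map_py forward_map out) := by unfold Spec_build_inverse_map_py; infer_instance

-- ===== CLAIM (what is proved, stated in full; the proofs are below) =====
def Claim_equal_build_inverse_map_py : Prop := ∀ (forward_map : List (String × String)), Dom_build_inverse_map_py forward_map → Spec_build_inverse_map_py forward_map (build_inverse_map_py forward_map)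

-- ===== LEMMAS AND PROOFS =====

-- the value map applied to each group, and its action on a whole dict
def pvValJoin (q : String × List String) : String × String := (q.1, PySem.Str.join "/" q.2)

def pvF (d : PySem.Dict String (List String)) : PySem.Dict String String :=
  PySem.Dict.mk (d.items.map pvValJoin)

theorem pv_items_F (d : PySem.Dict String (List String)) :
    (pvF d).items = d.items.map pvValJoin := rfl

theorem pv_get?_F (d : PySem.Dict String (List String)) (m : String) :
    (pvF d).get? m = (d.get? m).map (PySem.Str.join "/") := by
  simp [pvF, PySem.Dict.get?, List.find?_map, Option.map_map, Function.comp_def, pvValJoin]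

theorem pv_contains_F (d : PySem.Dict String (List String)) (m : String) :
    (pvF d).contains m = d.contains m := by
  rw [PySem.Dict.contains_eq_isSome_get?, PySem.Dict.contains_eq_isSome_get?, pv_get?_F]
  cases d.get? m <;> rfl

theorem pv_insert_F (d : PySem.Dict String (List String)) (k : String) (v : List String) :
    pvF (d.insert k v) = (pvF d).insert k (PySem.Str.join "/" v) := by
  apply PySem.Dict.ext
  rw [pv_items_F, PySem.Dict.items_insert, PySem.Dict.items_insert, pv_contains_F, pv_items_F]
  by_cases h : d.contains k = true
  · simp only [h, if_true, List.map_map]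
    apply List.map_congr_left
    intro p _
    by_cases hp : p.1 == k
    · simp [Function.comp, hp, pvValJoin]
    · simp [Function.comp, hp, pvValJoin]
  · simp [h, pvValJoin]

theorem pv_chars_join_append (sep x : List Char) :
    ∀ l : List (List Char), l ≠ [] →
      PySem.Chars.join sep (l ++ [x]) = PySem.Chars.join sep l ++ sep ++ x
  | [], h => absurd rfl h
  | [a], _ => by
      simp [PySem.Chars.join_cons_cons, PySem.Chars.join_singleton]
  | a :: b :: t, _ => by
      have ih := pv_chars_join_append sep x (b :: t) (by simp)
      simp only [List.cons_append] at ih ⊢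
      rw [PySem.Chars.join_cons_cons, ih, PySem.Chars.join_cons_cons]
      simp [List.append_assoc]

theorem pv_join_singleton (c : String) : PySem.Str.join "/" [c] = c := by
  apply String.toList_injective
  rw [PySem.Str.toList_join]
  simp [PySem.Chars.join_singleton]

theorem pv_join_append (cs : List String) (h : cs ≠ []) (c : String) :
    PySem.Str.join "/" (cs ++ [c]) = PySem.Str.join "/" cs ++ "/" ++ c := by
  apply String.toList_injective
  simp only [PySem.Str.toList_join, String.toList_append, List.map_append, List.map]
  exact pv_chars_join_append "/".toList c.toList (cs.map String.toList)
    (by simpa using h)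

-- invariant: every stored group is nonempty
def pvNE (d : PySem.Dict String (List String)) : Prop :=
  ∀ m cs, d.get? m = some cs → cs ≠ []

theorem pv_main (l : List (String × String)) :
    ∀ d : PySem.Dict String (List String), pvNE d →
      l.foldl
        (fun inverse_map p =>
          match inverse_map.get? p.2 with
          | none => inverse_map.insert p.2 p.1
          | some s => inverse_map.insert p.2 (s ++ "/" ++ p.1)) (pvF d)
        = pvF (l.foldl (fun groups p => groups.modify p.2 [] (fun cs => cs ++ [p.1])) d)
      ∧ pvNE (l.foldl (fun groups p => groups.modify p.2 [] (fun cs => cs ++ [p.1])) d) := by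
  induction l with
  | nil => intro d hd; exact ⟨rfl, hd⟩
  | cons p t ih =>
    intro d hd
    simp only [List.foldl_cons]
    have hstep :
        (match (pvF d).get? p.2 with
          | none => (pvF d).insert p.2 p.1
          | some s => (pvF d).insert p.2 (s ++ "/" ++ p.1))
          = pvF (d.modify p.2 [] (fun cs => cs ++ [p.1]))
        ∧ pvNE (d.modify p.2 [] (fun cs => cs ++ [p.1])) := by
      simp only [PySem.Dict.modify, PySem.Dict.getD_eq_get?_getD]
      cases hm : d.get? p.2 with
      | none =>
        constructor
        · rw [pv_get?_F, hm]
          simp only [Option.map_none, Option.getD_none, List.nil_append]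
          rw [pv_insert_F, pv_join_singleton]
        · intro m cs hcs
          rw [PySem.Dict.get?_insert] at hcs
          split_ifs at hcs with hmk
          · cases hcs; simp
          · exact hd m cs hcs
      | some cs0 =>
        have hne : cs0 ≠ [] := hd _ _ hm
        constructor
        · rw [pv_get?_F, hm]
          simp only [Option.map_some, Option.getD_some]
          rw [pv_insert_F, pv_join_append cs0 hne]
        · intro m cs hcs
          rw [PySem.Dict.get?_insert] at hcs
          split_ifs at hcs with hmk
          · cases hcs; simp
          · exact hd m cs hcs
    rw [hstep.1]
    exact ih _ hstep.2

-- ===== VERDICT (by name: the statement is the Claim_ definition above) =====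
theorem build_inverse_map_py_spec : Claim_equal_build_inverse_map_py := by
  intro fm _
  unfold Spec_build_inverse_map_py build_inverse_map_py build_inverse_map_py_alt
  have hemp : pvNE (PySem.Dict.empty : PySem.Dict String (List String)) := by
    intro m cs h
    rw [PySem.Dict.get?_empty] at h
    exact absurd h (by simp)
  have h := pv_main fm PySem.Dict.empty hemp
  have hF : pvF (PySem.Dict.empty : PySem.Dict String (List String)) = PySem.Dict.empty := rfl
  rw [hF] at h
  rw [h.1, pv_items_F]
  rfl
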